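-- pv_equiv track=rewrite | github.com/2025-II-Infra-ADAII/proyecto-i-ada-ii-grupo-o | src/dinamica.py | calcular_costo_programacion
-- ===== SOURCE A (Python) =====
-- from typing import List, Tuple
--
-- def calcular_costo_programacion(finca: List[Tuple[int, int, int]], permutacion: List[int]) -> int:
--     tiempos_siembra = [t[0] for t in finca]
--     tiempos_riego = [t[1] for t in finca]
--     penalizaciones = [t[2] for t in finca]
--
--     tiempo_actual = 0
--     costo_total = 0
--
--     for idx in permutacion:
--         tiempo_finalizacion = tiempo_actual + tiempos_riego[idx]
--         tardanza = max(0, tiempo_finalizacion - tiempos_siembra[idx])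
--         costo = penalizaciones[idx] * tardanza
--         costo_total += costo
--         tiempo_actual = tiempo_finalizacion
--
--     return costo_total
-- ===== SOURCE B (Python) =====
-- from typing import List, Tuple
--
-- def calcular_costo_programacion(finca: List[Tuple[int, int, int]], permutacion: List[int]) -> int:
--     # Stateless, definitional form: the finish time of the job at position k is
--     # the sum of the watering durations of the first k+1 scheduled jobs.
--     return sum(
--         finca[i][2] * max(0, sum(finca[j][1] for j in permutacion[:k + 1]) - finca[i][0])
--         for k, i in enumerate(permutacion)
--     )
-- ===== Notes on version B (the rewrite author's own statement) =====
-- stated objective: alternative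
-- what changed: Replaces A's single stateful accumulator loop (running clock + running cost over three pre-extracted parallel lists) with a stateless definitional double sum: for each position k the finish time is recomputed as the duration sum of the slice permutacion[:k+1], trading A's O(n+m) pass for an O(m^2) state-free formula.
import Mathlib
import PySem

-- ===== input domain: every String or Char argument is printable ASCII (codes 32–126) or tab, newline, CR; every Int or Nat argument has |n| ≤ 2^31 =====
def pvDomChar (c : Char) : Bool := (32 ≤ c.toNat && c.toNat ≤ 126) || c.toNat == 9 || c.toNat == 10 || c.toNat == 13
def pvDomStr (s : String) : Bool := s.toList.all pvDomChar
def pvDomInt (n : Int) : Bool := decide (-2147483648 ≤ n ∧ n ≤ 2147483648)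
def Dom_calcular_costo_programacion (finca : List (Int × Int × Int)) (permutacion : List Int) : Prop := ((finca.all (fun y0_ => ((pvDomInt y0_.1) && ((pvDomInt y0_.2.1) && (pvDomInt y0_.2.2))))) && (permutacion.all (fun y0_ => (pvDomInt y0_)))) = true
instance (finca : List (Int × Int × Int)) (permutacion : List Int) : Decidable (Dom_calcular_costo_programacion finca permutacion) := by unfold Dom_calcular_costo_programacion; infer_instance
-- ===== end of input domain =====

-- B replaces A's stateful accumulator loop by a stateless definitional double sum
-- (finish time at position k recomputed as the duration sum of permutacion[:k+1]).

-- ===== PORT A =====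
def calcular_costo_programacion (finca : List (Int × Int × Int)) (permutacion : List Int) : Int :=
  let tiempos_siembra := finca.map (fun t => t.1)
  let tiempos_riego := finca.map (fun t => t.2.1)
  let penalizaciones := finca.map (fun t => t.2.2)
  (permutacion.foldl (fun (st : Int × Int) idx =>
    let tiempo_finalizacion := st.1 + PySem.List.pyGetD tiempos_riego idx 0
    let tardanza := max 0 (tiempo_finalizacion - PySem.List.pyGetD tiempos_siembra idx 0)
    (tiempo_finalizacion, st.2 + PySem.List.pyGetD penalizaciones idx 0 * tardanza)) (0, 0)).2

-- ===== PORT B =====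
def calcular_costo_programacion_alt (finca : List (Int × Int × Int)) (permutacion : List Int) : Int :=
  ((PySem.List.enumerate permutacion 0).map (fun p =>
    (PySem.List.pyGetD finca p.2 (0, 0, 0)).2.2 *
      max 0 (((PySem.List.slice permutacion none (some (p.1 + 1))).map
                (fun j => (PySem.List.pyGetD finca j (0, 0, 0)).2.1)).sum
             - (PySem.List.pyGetD finca p.2 (0, 0, 0)).1))).sum

-- ===== PRECONDITION & SPEC =====
-- Pre_ excludes exactly the inputs where Python A raises IndexError: an index in
-- permutacion outside the valid (possibly negative) index range of finca.
def Pre_calcular_costo_programacion (finca : List (Int × Int × Int)) (permutacion : List Int) : Prop :=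
  ∀ i ∈ permutacion, PySem.Raise.InRange finca.length i
instance (finca : List (Int × Int × Int)) (permutacion : List Int) : Decidable (Pre_calcular_costo_programacion finca permutacion) := by unfold Pre_calcular_costo_programacion; infer_instance
def pvWitness_calcular_costo_programacion : (List (Int × Int × Int)) × List Int := ([(3, 2, 1), (1, 1, 4)], [1, 0, -1])

def Spec_calcular_costo_programacion (finca : List (Int × Int × Int)) (permutacion : List Int) (out : Int) : Prop := out = calcular_costo_programacion_alt finca permutacion
instance (finca : List (Int × Int × Int)) (permutacion : List Int) (out : Int) : Decidable (Spec_calcular_costo_programacion finca permutacion out) := by unfold Spec_calcular_costo_programacion; infer_instance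

-- ===== CLAIM =====
def Claim_equal_calcular_costo_programacion : Prop := ∀ (finca : List (Int × Int × Int)) (permutacion : List Int), Dom_calcular_costo_programacion finca permutacion → Pre_calcular_costo_programacion finca permutacion → Spec_calcular_costo_programacion finca permutacion (calcular_costo_programacion finca permutacion)

-- ===== LEMMAS AND PROOFS =====

lemma proj_riego (finca : List (Int × Int × Int)) (i : Int) :
    PySem.List.pyGetD (finca.map (fun t => t.2.1)) i 0
      = (PySem.List.pyGetD finca i (0, 0, 0)).2.1 :=
  PySem.List.pyGetD_map (fun t => t.2.1) finca i (0, 0, 0)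

lemma proj_siembra (finca : List (Int × Int × Int)) (i : Int) :
    PySem.List.pyGetD (finca.map (fun t => t.1)) i 0
      = (PySem.List.pyGetD finca i (0, 0, 0)).1 :=
  PySem.List.pyGetD_map (fun t => t.1) finca i (0, 0, 0)

lemma proj_pen (finca : List (Int × Int × Int)) (i : Int) :
    PySem.List.pyGetD (finca.map (fun t => t.2.2)) i 0
      = (PySem.List.pyGetD finca i (0, 0, 0)).2.2 :=
  PySem.List.pyGetD_map (fun t => t.2.2) finca i (0, 0, 0)

-- Loop invariant: the fused accumulator equals the stateless per-position sum,
-- with finish times expressed as prefix (take) sums relative to start clock t.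
lemma costo_loop (finca : List (Int × Int × Int)) :
    ∀ (perm : List Int) (s t c : Int),
    (perm.foldl (fun (st : Int × Int) idx =>
        (st.1 + (PySem.List.pyGetD finca idx (0, 0, 0)).2.1,
         st.2 + (PySem.List.pyGetD finca idx (0, 0, 0)).2.2
           * max 0 (st.1 + (PySem.List.pyGetD finca idx (0, 0, 0)).2.1
                      - (PySem.List.pyGetD finca idx (0, 0, 0)).1))) (t, c)).2
      = c + ((PySem.List.enumerate perm s).map (fun p =>
          (PySem.List.pyGetD finca p.2 (0, 0, 0)).2.2
            * max 0 (t + ((perm.take (p.1 + 1 - s).toNat).map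
                            (fun j => (PySem.List.pyGetD finca j (0, 0, 0)).2.1)).sum
                       - (PySem.List.pyGetD finca p.2 (0, 0, 0)).1))).sum := by
  intro perm
  induction perm with
  | nil => intro s t c; simp [PySem.List.enumerate_nil]
  | cons i rest ih =>
    intro s t c
    rw [PySem.List.enumerate_cons, List.map_cons, List.sum_cons, List.foldl_cons]
    have hfirst : (s + 1 - s).toNat = 1 := by omega
    have hrest :
        (PySem.List.enumerate rest (s + 1)).map (fun p =>
          (PySem.List.pyGetD finca p.2 (0, 0, 0)).2.2
            * max 0 (t + (((i :: rest).take (p.1 + 1 - s).toNat).map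
                            (fun j => (PySem.List.pyGetD finca j (0, 0, 0)).2.1)).sum
                       - (PySem.List.pyGetD finca p.2 (0, 0, 0)).1))
        = (PySem.List.enumerate rest (s + 1)).map (fun p =>
          (PySem.List.pyGetD finca p.2 (0, 0, 0)).2.2
            * max 0 ((t + (PySem.List.pyGetD finca i (0, 0, 0)).2.1)
                       + ((rest.take (p.1 + 1 - (s + 1)).toNat).map
                            (fun j => (PySem.List.pyGetD finca j (0, 0, 0)).2.1)).sum
                       - (PySem.List.pyGetD finca p.2 (0, 0, 0)).1)) := by
      apply List.map_congr_left
      intro p hp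
      obtain ⟨k, hk, rfl⟩ := (PySem.List.mem_enumerate_iff _ _ _).1 hp
      have h1 : ((s + 1 + (k : Int)) + 1 - s).toNat = ((s + 1 + (k : Int)) + 1 - (s + 1)).toNat + 1 := by
        omega
      rw [h1, List.take_succ_cons, List.map_cons, List.sum_cons]
      ring_nf
    rw [hrest, ih (s + 1)]
    rw [hfirst]
    simp [List.take_succ_cons]
    ring

-- ===== VERDICT =====
theorem calcular_costo_programacion_spec : Claim_equal_calcular_costo_programacion := by
  intro finca perm _ _
  unfold Spec_calcular_costo_programacion calcular_costo_programacion calcular_costo_programacion_alt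
  simp only [proj_riego, proj_siembra, proj_pen]
  rw [costo_loop finca perm 0 0 0]
  simp only [zero_add]
  congr 1
  apply List.map_congr_left
  intro p hp
  obtain ⟨k, hk, rfl⟩ := (PySem.List.mem_enumerate_iff _ _ _).1 hp
  have h0 : (0 : Int) + (k : Int) + 1 = ((k + 1 : Nat) : Int) := by push_cast; ring
  rw [h0, PySem.List.slice_to_natCast]
  congr 2
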